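-- pv_equiv track=rewrite | github.com/WJ-Tien/algo | leetcode_common_patterns/stack_monotonic_stack.py | canBeValid_stack
-- ===== SOURCE A (Python) =====
-- def canBeValid_stack(s: str, locked: str):
--     # 921. Minimum Add to Make Parentheses Valid
--     # greedy algo
--     length = len(s)
--
--     # If length of string is odd, return false.
--     if length % 2 == 1:
--         return False
--
--     open_brackets = []
--     unlocked = []
--
--     # Iterate through the string to handle '(' and ')'
--     for i in range(length):
--         if locked[i] == "0":
--             unlocked.append(i)
--         elif s[i] == "(":
--             open_brackets.append(i)
--         elif s[i] == ")":
--             if open_brackets: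
--                 open_brackets.pop()
--             elif unlocked:
--                 unlocked.pop()
--             else:
--                 return False
--
--     # Match remaining open brackets and the unlocked characters
--     while open_brackets and unlocked and open_brackets[-1] < unlocked[-1]:
--         open_brackets.pop()
--         unlocked.pop()
--
--     if open_brackets:
--         return False
--
--     return True
-- ===== SOURCE B (Python) =====
-- def canBeValid_stack(s: str, locked: str):
--     # Two-pass balance counters instead of index stacks.
--     if len(s) % 2 == 1:
--         return False
--     bal = 0
--     for i in range(len(s)):
--         if locked[i] == "0" or s[i] == "(":
--             bal += 1
--         elif s[i] == ")":
--             bal -= 1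
--         if bal < 0:
--             return False
--     bal = 0
--     for i in range(len(s) - 1, -1, -1):
--         if locked[i] == "0" or s[i] == ")":
--             bal += 1
--         elif s[i] == "(":
--             bal -= 1
--         if bal < 0:
--             return False
--     return True
-- ===== Notes on version B (the rewrite author's own statement) =====
-- stated objective: simpler
-- what changed: Replaces A's two index stacks and its final top-of-stack matching phase by two O(1)-state balance-counter passes (left-to-right, then right-to-left); Pre_ excludes even-length s with locked shorter than s, where A either raises IndexError or returns False depending on how far its loop gets - B behaves identically (same False / same IndexError) there.
-- outside the precondition, e.g. on canBeValid_stack('))', '1'): A returns False, B returns False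
import Mathlib
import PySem

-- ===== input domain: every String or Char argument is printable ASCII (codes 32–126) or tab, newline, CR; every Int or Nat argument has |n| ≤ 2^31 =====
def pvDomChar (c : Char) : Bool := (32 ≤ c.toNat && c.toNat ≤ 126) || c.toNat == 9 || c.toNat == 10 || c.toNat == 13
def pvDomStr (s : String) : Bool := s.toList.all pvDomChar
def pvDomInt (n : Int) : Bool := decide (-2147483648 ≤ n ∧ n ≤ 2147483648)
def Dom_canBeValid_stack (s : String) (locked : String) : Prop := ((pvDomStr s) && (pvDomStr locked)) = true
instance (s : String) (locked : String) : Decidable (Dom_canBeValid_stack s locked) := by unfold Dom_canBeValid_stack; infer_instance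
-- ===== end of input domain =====

-- B replaces A's two index stacks by two constant-space balance-counter passes; equal return values proved on Pre_.

-- ===== PORT A =====
-- the final while-loop + 'if open_brackets' check of A (stacks held head-first, head = top)
def pvFinishA : List Int → List Int → Bool
  | o :: os, u :: us => if o < u then pvFinishA os us else false
  | [], _ => true
  | _ :: _, [] => false

-- the 'for i in range(length)' loop of A; 'opens'/'unlocked' are the two stacks, head = top
def pvLoopA (s locked : String) (i : Nat) (opens unlocked : List Int) : Bool :=
  if h : i < s.toList.length then
    match PySem.Str.pyGet? locked (i : Int), PySem.Str.pyGet? s (i : Int) with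
    | some lk, some c =>
      if lk = '0' then pvLoopA s locked (i+1) opens ((i : Int) :: unlocked)
      else if c = '(' then pvLoopA s locked (i+1) ((i : Int) :: opens) unlocked
      else if c = ')' then
        match opens, unlocked with
        | _ :: os, _ => pvLoopA s locked (i+1) os unlocked
        | [], _ :: us => pvLoopA s locked (i+1) [] us
        | [], [] => false
      else pvLoopA s locked (i+1) opens unlocked
    | _, _ => false   -- locked[i] out of range: IndexError in Python, outside Pre_
  else pvFinishA opens unlocked
termination_by s.toList.length - i
decreasing_by all_goals omega

def canBeValid_stack (s : String) (locked : String) : Bool :=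
  let length := PySem.Str.len s
  if PySem.Int.mod length 2 == 1 then false
  else pvLoopA s locked 0 [] []

-- ===== PORT B =====
-- forward pass of Source B
def pvLoopBf (s locked : String) (i : Nat) (bal : Int) : Bool :=
  if h : i < s.toList.length then
    match PySem.Str.pyGet? locked (i : Int), PySem.Str.pyGet? s (i : Int) with
    | some lk, some c =>
      let bal' := if lk = '0' ∨ c = '(' then bal + 1 else if c = ')' then bal - 1 else bal
      if bal' < 0 then false else pvLoopBf s locked (i+1) bal'
    | _, _ => false   -- IndexError, outside Pre_
  else true
termination_by s.toList.length - i
decreasing_by all_goals omega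

-- backward pass of Source B: 'for i in range(len(s)-1, -1, -1)'; argument = number of indices left
def pvLoopBb (s locked : String) : Nat → Int → Bool
  | 0, _ => true
  | i+1, bal =>
    match PySem.Str.pyGet? locked (i : Int), PySem.Str.pyGet? s (i : Int) with
    | some lk, some c =>
      let bal' := if lk = '0' ∨ c = ')' then bal + 1 else if c = '(' then bal - 1 else bal
      if bal' < 0 then false else pvLoopBb s locked i bal'
    | _, _ => false   -- IndexError, outside Pre_

def canBeValid_stack_alt (s : String) (locked : String) : Bool :=
  if PySem.Int.mod (PySem.Str.len s) 2 == 1 then false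
  else pvLoopBf s locked 0 0 && pvLoopBb s locked s.toList.length 0

-- ===== PRECONDITION & SPEC =====
-- Pre_ excludes even-length s with locked shorter than s: there A either raises IndexError or
-- returns False depending on how far its loop gets (not expressible in closed form); B behaves
-- identically (same False / same IndexError) on all of them.
def Pre_canBeValid_stack (s : String) (locked : String) : Prop :=
  s.toList.length % 2 = 1 ∨ s.toList.length ≤ locked.toList.length
instance (s : String) (locked : String) : Decidable (Pre_canBeValid_stack s locked) := by unfold Pre_canBeValid_stack; infer_instance
def pvWitness_canBeValid_stack : String × String := ("()", "11")

def Spec_canBeValid_stack (s : String) (locked : String) (out : Bool) : Prop := out = canBeValid_stack_alt s locked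
instance (s : String) (locked : String) (out : Bool) : Decidable (Spec_canBeValid_stack s locked out) := by unfold Spec_canBeValid_stack; infer_instance

-- ===== CLAIM (what is proved, stated in full; the proofs are below) =====
def Claim_equal_canBeValid_stack : Prop := ∀ (s : String) (locked : String), Dom_canBeValid_stack s locked → Pre_canBeValid_stack s locked → Spec_canBeValid_stack s locked (canBeValid_stack s locked)

-- ===== LEMMAS AND PROOFS =====

-- Abstract token alphabet: U = unlocked, O = locked '(', C = locked ')', N = other locked char
inductive PvTok : Type | U | O | C | N
deriving DecidableEq, Repr

def pvTok (lk c : Char) : PvTok :=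
  if lk = '0' then .U else if c = '(' then .O else if c = ')' then .C else .N

def pvToks (s locked : String) : List PvTok := List.zipWith pvTok locked.toList s.toList

def pvW : PvTok → Int | .U => 1 | .O => 1 | .C => -1 | .N => 0
def pvWr : PvTok → Int | .U => 1 | .O => -1 | .C => 1 | .N => 0

def pvBal (l : List PvTok) : Int := (l.map pvW).sum
def pvRbal (l : List PvTok) : Int := (l.map pvWr).sum

-- abstract machines
def pvFinish : List Nat → List Nat → Bool
  | o :: os, u :: us => if o < u then pvFinish os us else false
  | [], _ => true
  | _ :: _, [] => false

def pvRun : List PvTok → Nat → List Nat → List Nat → Bool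
  | [], _, os, us => pvFinish os us
  | .U :: r, m, os, us => pvRun r (m+1) os (m :: us)
  | .O :: r, m, os, us => pvRun r (m+1) (m :: os) us
  | .N :: r, m, os, us => pvRun r (m+1) os us
  | .C :: r, m, o :: os, us => pvRun r (m+1) os us
  | .C :: r, m, [], u :: us => pvRun r (m+1) [] us
  | .C :: _, _, [], [] => false

def pvBf : List PvTok → Int → Bool
  | [], _ => true
  | t :: r, b => if b + pvW t < 0 then false else pvBf r (b + pvW t)

def pvBr : List PvTok → Int → Bool
  | [], _ => true
  | t :: r, b => if b + pvWr t < 0 then false else pvBr r (b + pvWr t)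

def pvCge (L : List Nat) (k : Nat) : Int := ((L.filter (fun x => decide (k ≤ x))).length : Int)
def pvCnt (t : PvTok) (l : List PvTok) : Int := (l.count t : Int)
def pvSeg (full : List PvTok) (k m : Nat) : List PvTok := (full.take m).drop k


-- basic facts about the counting helpers
lemma pvCnt_nonneg (t : PvTok) (l : List PvTok) : 0 ≤ pvCnt t l := Int.natCast_nonneg _

lemma pvCnt_append (t : PvTok) (a b : List PvTok) : pvCnt t (a ++ b) = pvCnt t a + pvCnt t b := by
  simp [pvCnt, List.count_append]

lemma pvCnt_cons (t x : PvTok) (l : List PvTok) :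
    pvCnt t (x :: l) = pvCnt t l + (if x = t then 1 else 0) := by
  by_cases h : x = t <;> simp [pvCnt, List.count_cons, h]

lemma pvRbal_counts (l : List PvTok) : pvRbal l = pvCnt .U l + pvCnt .C l - pvCnt .O l := by
  induction l with
  | nil => simp [pvRbal, pvCnt]
  | cons t r ih =>
    simp only [pvRbal, List.map_cons, List.sum_cons] at *
    rw [pvCnt_cons, pvCnt_cons, pvCnt_cons]
    cases t <;> simp [pvWr] <;> omega

lemma pvCge_nonneg (L : List Nat) (k : Nat) : 0 ≤ pvCge L k := Int.natCast_nonneg _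

lemma pvCge_cons (x : Nat) (L : List Nat) (k : Nat) :
    pvCge (x :: L) k = (if k ≤ x then 1 else 0) + pvCge L k := by
  by_cases h : k ≤ x <;> simp [pvCge, List.filter_cons, h] <;> omega

lemma pvCge_append (A B : List Nat) (k : Nat) : pvCge (A ++ B) k = pvCge A k + pvCge B k := by
  simp [pvCge, List.filter_append]

lemma pvCge_le_length (L : List Nat) (k : Nat) : pvCge L k ≤ (L.length : Int) := by
  simp only [pvCge, Int.ofNat_le]
  exact_mod_cast List.length_filter_le _ _

lemma pvCge_eq_zero (L : List Nat) (k : Nat) (h : ∀ x ∈ L, x < k) : pvCge L k = 0 := by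
  have : L.filter (fun x => decide (k ≤ x)) = [] :=
    List.filter_eq_nil_iff.mpr (by intro a ha; simpa using Nat.not_le.mpr (h a ha))
  simp [pvCge, this]

lemma pvCge_eq_length (L : List Nat) (k : Nat) (h : ∀ x ∈ L, k ≤ x) : pvCge L k = L.length := by
  have : L.filter (fun x => decide (k ≤ x)) = L :=
    List.filter_eq_self.mpr (by intro a ha; simpa using h a ha)
  simp [pvCge, this]

-- segment lemmas
lemma pvSeg_zero (full : List PvTok) (k : Nat) : pvSeg full k 0 = [] := by simp [pvSeg]

lemma pvSeg_nil_of_le (full : List PvTok) (k m : Nat) (h : m ≤ k) : pvSeg full k m = [] :=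
  List.drop_eq_nil_of_le (by simp only [List.length_take]; omega)

lemma pvSeg_succ (full : List PvTok) (k m : Nat) (h : k ≤ m) (hm : m < full.length) :
    pvSeg full k (m+1) = pvSeg full k m ++ [full[m]] := by
  unfold pvSeg
  rw [List.take_add_one, List.getElem?_eq_getElem hm]
  simp only [Option.toList]
  rw [List.drop_append_of_le_length (by simp only [List.length_take]; omega)]

lemma pvSeg_full (full : List PvTok) (k : Nat) : pvSeg full k full.length = full.drop k := by
  simp [pvSeg]

lemma pvSeg_split (full : List PvTok) (k x m : Nat) (hk : k ≤ x) (hx : x < m) (hxf : x < full.length) :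
    pvSeg full k m = pvSeg full k x ++ full[x] :: (full.take m).drop (x+1) := by
  have hxA : x < (full.take m).length := by simp only [List.length_take]; omega
  have h1 : (full.take m).drop x = full[x] :: (full.take m).drop (x+1) := by
    rw [List.drop_eq_getElem_cons hxA, List.getElem_take]
  have h2 : pvSeg full k m = ((full.take m).take x).drop k ++ (full.take m).drop x := by
    conv_lhs => rw [pvSeg, ← List.take_append_drop x (full.take m)]
    rw [List.drop_append_of_le_length (by simp only [List.length_take]; omega)]
  rw [h2, List.take_take, min_eq_left (le_of_lt hx), h1, pvSeg]


-- sorted-stack bounds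
lemma pvCge_getElem_ge (L : List Nat) (hs : L.Pairwise (· > ·)) (j : Nat) (hj : j < L.length) :
    (j : Int) + 1 ≤ pvCge L (L[j]) := by
  have hmem : ∀ x ∈ L.take (j+1), L[j] ≤ x := by
    intro x hx
    obtain ⟨i, hi, hx⟩ := List.mem_take_iff_getElem.mp hx
    subst hx
    rcases Nat.lt_or_ge i j with h | h
    · exact le_of_lt ((List.pairwise_iff_getElem.mp hs) i j _ hj h)
    · have : i = j := by omega
      subst this; rfl
  have h1 : pvCge (L.take (j+1)) (L[j]) = ((L.take (j+1)).length : Int) := pvCge_eq_length _ _ hmem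
  have h2 : pvCge L (L[j]) = pvCge (L.take (j+1)) (L[j]) + pvCge (L.drop (j+1)) (L[j]) := by
    rw [← pvCge_append, List.take_append_drop]
  have h3 := pvCge_nonneg (L.drop (j+1)) (L[j])
  have h4 : (j+1 : Nat) ≤ (L.take (j+1)).length ∨ (L.take (j+1)).length = min (j+1) L.length := by
    right; simp
  simp only [List.length_take] at h1
  omega

lemma pvCge_le_of_tail_lt (L : List Nat) (k j : Nat)
    (h : ∀ i (hi : i < L.length), j ≤ i → L[i] < k) : pvCge L k ≤ (j : Int) := by
  have hsplit : pvCge L k = pvCge (L.take j) k + pvCge (L.drop j) k := by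
    rw [← pvCge_append, List.take_append_drop]
  have h2 : pvCge (L.drop j) k = 0 := by
    apply pvCge_eq_zero
    intro x hx
    obtain ⟨i, hi, hx⟩ := List.mem_drop_iff_getElem.mp hx
    subst hx
    exact h (j + i) (by omega) (by omega)
  have h3 := pvCge_le_length (L.take j) k
  simp only [List.length_take] at h3
  have : ((min j L.length : Nat) : Int) ≤ (j : Int) := by exact_mod_cast Nat.cast_le.mpr (Nat.min_le_left _ _)
  omega

-- a sorted stack whose entries all carry token t in full is counted by the segment
lemma pvCge_le_cnt (full : List PvTok) (t : PvTok) :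
    ∀ (L : List Nat) (k m : Nat), L.Pairwise (· > ·) → (∀ x ∈ L, x < m ∧ full[x]? = some t) →
      pvCge L k ≤ pvCnt t (pvSeg full k m) := by
  intro L
  induction L with
  | nil => intro k m _ _; simpa [pvCge] using pvCnt_nonneg t (pvSeg full k m)
  | cons x xs ih =>
    intro k m hp hb
    obtain ⟨hxm, hxt⟩ := hb x (by simp)
    obtain ⟨hxf, hval⟩ := List.getElem?_eq_some_iff.mp hxt
    have hxs : ∀ y ∈ xs, y < x := fun y hy => (List.pairwise_cons.mp hp).1 y hy
    by_cases hk : k ≤ x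
    · have hih := ih k x (List.pairwise_cons.mp hp).2
        (fun y hy => ⟨hxs y hy, (hb y (by simp [hy])).2⟩)
      rw [pvCge_cons, if_pos hk, pvSeg_split full k x m hk hxm hxf]
      rw [pvCnt_append, pvCnt_cons]
      have h1 := pvCnt_nonneg t ((full.take m).drop (x+1))
      rw [if_pos hval]
      omega
    · rw [pvCge_cons, if_neg hk]
      have h0 : pvCge xs k = 0 :=
        pvCge_eq_zero xs k (fun y hy => lt_trans (hxs y hy) (Nat.lt_of_not_le hk))
      rw [h0]
      simpa using pvCnt_nonneg t (pvSeg full k m)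

-- the final matching phase: success and failure characterisations
lemma pvFinish_cge : ∀ (O U : List Nat), pvFinish O U = true → ∀ k, pvCge O k ≤ pvCge U k := by
  intro O
  induction O with
  | nil => intro U _ k; simpa [pvCge] using pvCge_nonneg U k
  | cons o os ih =>
    intro U hf k
    cases U with
    | nil => simp [pvFinish] at hf
    | cons u us =>
      rw [pvFinish] at hf
      by_cases ho : o < u
      · rw [if_pos ho] at hf
        have := ih us hf k
        rw [pvCge_cons, pvCge_cons]
        by_cases hko : k ≤ o
        · rw [if_pos hko, if_pos (by omega)]; omega
        · rw [if_neg hko]; split <;> omega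
      · rw [if_neg ho] at hf; exact absurd hf (by simp)

lemma pvFinish_false : ∀ (O U : List Nat), pvFinish O U = false →
    ∃ j, ∃ hj : j < O.length, U.length ≤ j ∨ ∃ hju : j < U.length, U[j] ≤ O[j] := by
  intro O
  induction O with
  | nil => intro U h; simp [pvFinish] at h
  | cons o os ih =>
    intro U hf
    cases U with
    | nil => exact ⟨0, by simp, Or.inl (by simp)⟩
    | cons u us =>
      rw [pvFinish] at hf
      by_cases ho : o < u
      · rw [if_pos ho] at hf
        obtain ⟨j, hj, hcase⟩ := ih us hf
        refine ⟨j + 1, by simpa using hj, ?_⟩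
        rcases hcase with h | ⟨hju, hle⟩
        · exact Or.inl (by simpa using h)
        · exact Or.inr ⟨by simpa using hju, by simpa using hle⟩
      · exact ⟨0, by simp, Or.inr ⟨by simp, by simpa using Nat.le_of_not_lt ho⟩⟩

-- counter-pass specifications
lemma pvBf_spec : ∀ (l : List PvTok) (b : Int), 0 ≤ b →
    (pvBf l b = true ↔ ∀ k : Nat, 0 ≤ b + pvBal (l.take k)) := by
  intro l
  induction l with
  | nil => intro b hb; simp [pvBf, pvBal, hb]
  | cons t r ih =>
    intro b hb
    rw [pvBf]
    by_cases hneg : b + pvW t < 0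
    · rw [if_pos hneg]
      constructor
      · intro h; exact absurd h (by simp)
      · intro h; have := h 1; simp [pvBal] at this; omega
    · rw [if_neg hneg]
      rw [ih (b + pvW t) (by omega)]
      constructor
      · intro h k
        cases k with
        | zero => simpa [pvBal] using hb
        | succ k => have := h k; simp [pvBal] at this ⊢; omega
      · intro h k
        have := h (k + 1); simp [pvBal] at this ⊢; omega

lemma pvBr_spec : ∀ (l : List PvTok) (b : Int), 0 ≤ b →
    (pvBr l b = true ↔ ∀ k : Nat, 0 ≤ b + pvRbal (l.take k)) := by
  intro l
  induction l with
  | nil => intro b hb; simp [pvBr, pvRbal, hb]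
  | cons t r ih =>
    intro b hb
    rw [pvBr]
    by_cases hneg : b + pvWr t < 0
    · rw [if_pos hneg]
      constructor
      · intro h; exact absurd h (by simp)
      · intro h; have := h 1; simp [pvRbal] at this; omega
    · rw [if_neg hneg]
      rw [ih (b + pvWr t) (by omega)]
      constructor
      · intro h k
        cases k with
        | zero => simpa [pvRbal] using hb
        | succ k => have := h k; simp [pvRbal] at this ⊢; omega
      · intro h k
        have := h (k + 1); simp [pvRbal] at this ⊢; omega


lemma pvFinish_iff (full : List PvTok) (O U : List Nat)
    (h1 : O.Pairwise (· > ·)) (h1b : ∀ o ∈ O, o < full.length ∧ full[o]? = some .O)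
    (h2 : U.Pairwise (· > ·)) (h2b : ∀ u ∈ U, u < full.length ∧ full[u]? = some .U)
    (h3 : ∀ k ∈ O, pvCnt .O (full.drop k) - pvCnt .C (full.drop k) - pvCnt .U (full.drop k) = pvCge O k - pvCge U k)
    (h4 : ∀ k : Nat, pvCnt .O (full.drop k) - pvCnt .C (full.drop k) ≤ pvCge O k) :
    (pvFinish O U = true ↔ ∀ k : Nat, 0 ≤ pvRbal (full.drop k)) := by
  constructor
  · intro hf k
    rw [pvRbal_counts]
    have ha := h4 k
    have hb := pvFinish_cge O U hf k
    have hc := pvCge_le_cnt full .U U k full.length h2 h2b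
    rw [pvSeg_full] at hc
    omega
  · intro hall
    by_contra hf
    have hf' : pvFinish O U = false := by simpa using hf
    obtain ⟨j, hj, hcase⟩ := pvFinish_false O U hf'
    have hkO : O[j] ∈ O := List.getElem_mem hj
    have e3 := h3 (O[j]) hkO
    have hge := pvCge_getElem_ge O h1 j hj
    have hle : pvCge U (O[j]) ≤ (j : Int) := by
      apply pvCge_le_of_tail_lt U (O[j]) j
      intro i hi hji
      rcases hcase with hl | ⟨hju, hleq⟩
      · omega
      · have hne : U[j] ≠ O[j] := by
          intro he
          have hO := (h1b _ hkO).2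
          have hU := (h2b _ (List.getElem_mem hju)).2
          rw [he, hO] at hU
          simp at hU
        have hjlt : U[j] < O[j] := lt_of_le_of_ne hleq hne
        rcases Nat.eq_or_lt_of_le hji with he | hlt
        · have : U[i] = U[j] := by congr 1; omega
          omega
        · have := (List.pairwise_iff_getElem.mp h2) j i hju hi hlt
          omega
    have hk := hall (O[j])
    rw [pvRbal_counts] at hk
    omega

lemma pvCnt_seg_succ (full : List PvTok) (k m : Nat) (hm : m < full.length) (t' x : PvTok)
    (ht : full[m]? = some t') :
    pvCnt x (pvSeg full k (m+1)) =
      if k ≤ m then pvCnt x (pvSeg full k m) + (if t' = x then 1 else 0) else 0 := by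
  by_cases hk : k ≤ m
  · rw [if_pos hk, pvSeg_succ full k m hk hm, pvCnt_append]
    have hv : full[m] = t' := (List.getElem?_eq_some_iff.mp ht).2
    rw [hv]
    by_cases h : t' = x <;> simp [pvCnt, h]
  · rw [if_neg hk, pvSeg_nil_of_le full k (m+1) (by omega)]
    simp [pvCnt]


lemma pvCnt_seg_succ_self (full : List PvTok) (k m : Nat) (hm : m < full.length) (t' : PvTok)
    (ht : full[m]? = some t') :
    pvCnt t' (pvSeg full k (m+1)) = if k ≤ m then pvCnt t' (pvSeg full k m) + 1 else 0 := by
  rw [pvCnt_seg_succ full k m hm t' t' ht, if_pos rfl]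

lemma pvCnt_seg_succ_ne (full : List PvTok) (k m : Nat) (hm : m < full.length) (t' x : PvTok)
    (ht : full[m]? = some t') (hne : t' ≠ x) :
    pvCnt x (pvSeg full k (m+1)) = if k ≤ m then pvCnt x (pvSeg full k m) else 0 := by
  rw [pvCnt_seg_succ full k m hm t' x ht, if_neg hne, add_zero]

-- shifting the forward-balance condition across one processed token
lemma pvFirst_congr (c c' : Int) (t : PvTok) (rest : List PvTok) (hc : 0 ≤ c)
    (he : c' = c + pvW t) :
    ((∀ k : Nat, 0 ≤ c + pvBal ((t :: rest).take k)) ↔ (∀ k : Nat, 0 ≤ c' + pvBal (rest.take k))) := by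
  subst he
  constructor
  · intro h k
    have := h (k+1)
    simp [pvBal] at this ⊢
    omega
  · intro h k
    cases k with
    | zero => simpa [pvBal] using hc
    | succ k =>
      have := h k
      simp [pvBal] at this ⊢
      omega

lemma pvMain (full : List PvTok) :
    ∀ (r : List PvTok) (m : Nat) (O U : List Nat),
    full.drop m = r → m ≤ full.length →
    O.Pairwise (· > ·) → (∀ o ∈ O, o < m ∧ full[o]? = some .O) →
    U.Pairwise (· > ·) → (∀ u ∈ U, u < m ∧ full[u]? = some .U) →
    (∀ k ∈ O, pvCnt .O (pvSeg full k m) - pvCnt .C (pvSeg full k m) - pvCnt .U (pvSeg full k m) = pvCge O k - pvCge U k) →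
    (∀ k : Nat, pvCnt .O (pvSeg full k m) - pvCnt .C (pvSeg full k m) ≤ pvCge O k) →
    (pvRun r m O U = true ↔
      ((∀ k : Nat, 0 ≤ (O.length : Int) + (U.length : Int) + pvBal (r.take k)) ∧
       (∀ k : Nat, 0 ≤ pvRbal (full.drop k)))) := by
  intro r
  induction r with
  | nil =>
    intro m O U hdrop hm h1 h1b h2 h2b h3 h4
    have hmf : m = full.length := by
      have := congrArg List.length hdrop
      simp at this
      omega
    subst hmf
    simp only [pvSeg_full] at h3 h4
    rw [pvRun]
    rw [pvFinish_iff full O U h1 h1b h2 h2b h3 h4]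
    constructor
    · intro h
      refine ⟨fun k => by simp [pvBal]; positivity, h⟩
    · exact fun h => h.2
  | cons t rest ih =>
    intro m O U hdrop hm h1 h1b h2 h2b h3 h4
    have hmlt : m < full.length := by
      have := congrArg List.length hdrop
      simp at this
      omega
    have hcons : full.drop m = full[m] :: full.drop (m+1) := List.drop_eq_getElem_cons hmlt
    rw [hdrop] at hcons
    obtain ⟨hte, hre⟩ : t = full[m] ∧ rest = full.drop (m+1) := by
      constructor <;> [exact (List.cons.injEq _ _ _ _ ▸ hcons).1; exact (List.cons.injEq _ _ _ _ ▸ hcons).2]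
    have htm : full[m]? = some t := by rw [List.getElem?_eq_getElem hmlt, hte]
    have hdrop' : full.drop (m+1) = rest := hre.symm
    have hnn : (0:Int) ≤ (O.length : Int) + (U.length : Int) := by positivity
    cases t with
    | N =>
      rw [pvRun]
      rw [ih (m+1) O U hdrop' (by omega) h1
        (fun o ho => ⟨by have := (h1b o ho).1; omega, (h1b o ho).2⟩)
        h2 (fun u hu => ⟨by have := (h2b u hu).1; omega, (h2b u hu).2⟩) ?h3 ?h4]
      case h3 =>
        intro k hkO
        have hkm : k < m := (h1b k hkO).1
        rw [pvCnt_seg_succ_ne full k m hmlt .N .O htm (by decide),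
            pvCnt_seg_succ_ne full k m hmlt .N .C htm (by decide),
            pvCnt_seg_succ_ne full k m hmlt .N .U htm (by decide),
            if_pos (by omega : k ≤ m), if_pos (by omega : k ≤ m), if_pos (by omega : k ≤ m)]
        exact h3 k hkO
      case h4 =>
        intro k
        rw [pvCnt_seg_succ_ne full k m hmlt .N .O htm (by decide),
            pvCnt_seg_succ_ne full k m hmlt .N .C htm (by decide)]
        by_cases hk : k ≤ m
        · rw [if_pos hk, if_pos hk]; exact h4 k
        · rw [if_neg hk, if_neg hk]
          have := pvCge_nonneg O k
          omega
      exact and_congr_left' (pvFirst_congr _ _ .N rest hnn (by simp only [pvW, List.length_cons]; push_cast; omega)).symm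
    | U =>
      rw [pvRun]
      rw [ih (m+1) O (m :: U) hdrop' (by omega) h1
        (fun o ho => ⟨by have := (h1b o ho).1; omega, (h1b o ho).2⟩)
        ?p2 ?p2b ?h3 ?h4]
      case p2 =>
        rw [List.pairwise_cons]
        exact ⟨fun u hu => (h2b u hu).1, h2⟩
      case p2b =>
        intro u hu
        rcases List.mem_cons.mp hu with he | hu
        · subst he; exact ⟨by omega, htm⟩
        · exact ⟨by have := (h2b u hu).1; omega, (h2b u hu).2⟩
      case h3 =>
        intro k hkO
        have hkm : k < m := (h1b k hkO).1
        rw [pvCnt_seg_succ_ne full k m hmlt .U .O htm (by decide),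
            pvCnt_seg_succ_ne full k m hmlt .U .C htm (by decide),
            pvCnt_seg_succ_self full k m hmlt .U htm,
            if_pos (by omega : k ≤ m), if_pos (by omega : k ≤ m), if_pos (by omega : k ≤ m)]
        rw [pvCge_cons, if_pos (by omega : k ≤ m)]
        have := h3 k hkO
        omega
      case h4 =>
        intro k
        rw [pvCnt_seg_succ_ne full k m hmlt .U .O htm (by decide),
            pvCnt_seg_succ_ne full k m hmlt .U .C htm (by decide)]
        by_cases hk : k ≤ m
        · rw [if_pos hk, if_pos hk]; exact h4 k
        · rw [if_neg hk, if_neg hk]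
          have := pvCge_nonneg O k
          omega
      exact and_congr_left' (pvFirst_congr _ _ .U rest hnn (by simp only [pvW, List.length_cons]; push_cast; omega)).symm
    | O =>
      rw [pvRun]
      rw [ih (m+1) (m :: O) U hdrop' (by omega) ?p1 ?p1b h2
        (fun u hu => ⟨by have := (h2b u hu).1; omega, (h2b u hu).2⟩) ?h3 ?h4]
      case p1 =>
        rw [List.pairwise_cons]
        exact ⟨fun o ho => (h1b o ho).1, h1⟩
      case p1b =>
        intro o ho
        rcases List.mem_cons.mp ho with he | ho
        · subst he; exact ⟨by omega, htm⟩
        · exact ⟨by have := (h1b o ho).1; omega, (h1b o ho).2⟩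
      case h3 =>
        intro k hkO
        rw [pvCnt_seg_succ_self full k m hmlt .O htm,
            pvCnt_seg_succ_ne full k m hmlt .O .C htm (by decide),
            pvCnt_seg_succ_ne full k m hmlt .O .U htm (by decide)]
        rcases List.mem_cons.mp hkO with he | hkO
        · rw [he]
          rw [if_pos (le_refl m), if_pos (le_refl m), if_pos (le_refl m)]
          rw [pvSeg_nil_of_le full m m (le_refl m)]
          rw [pvCge_cons, if_pos (le_refl m)]
          rw [pvCge_eq_zero O m (fun x hx => (h1b x hx).1), pvCge_eq_zero U m (fun x hx => (h2b x hx).1)]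
          simp [pvCnt]
        · have hkm : k < m := (h1b k hkO).1
          rw [if_pos (by omega : k ≤ m), if_pos (by omega : k ≤ m), if_pos (by omega : k ≤ m)]
          rw [pvCge_cons, if_pos (by omega : k ≤ m)]
          have := h3 k hkO
          omega
      case h4 =>
        intro k
        rw [pvCnt_seg_succ_self full k m hmlt .O htm,
            pvCnt_seg_succ_ne full k m hmlt .O .C htm (by decide)]
        rw [pvCge_cons]
        by_cases hk : k ≤ m
        · rw [if_pos hk, if_pos hk, if_pos hk]
          have := h4 k
          omega
        · rw [if_neg hk, if_neg hk, if_neg hk]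
          have := pvCge_nonneg O k
          omega
      exact and_congr_left' (pvFirst_congr _ _ .O rest hnn (by simp only [pvW, List.length_cons]; push_cast; omega)).symm
    | C =>
      cases O with
      | cons o os =>
        rw [pvRun]
        rw [ih (m+1) os U hdrop' (by omega) (List.pairwise_cons.mp h1).2
          (fun x hx => ⟨by have := (h1b x (by simp [hx])).1; omega, (h1b x (by simp [hx])).2⟩)
          h2 (fun u hu => ⟨by have := (h2b u hu).1; omega, (h2b u hu).2⟩) ?h3 ?h4]
        case h3 =>
          intro k hkO
          have hko : k < o := (List.pairwise_cons.mp h1).1 k hkO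
          have hkm : k < m := (h1b k (by simp [hkO])).1
          rw [pvCnt_seg_succ_ne full k m hmlt .C .O htm (by decide),
              pvCnt_seg_succ_self full k m hmlt .C htm,
              pvCnt_seg_succ_ne full k m hmlt .C .U htm (by decide),
              if_pos (by omega : k ≤ m), if_pos (by omega : k ≤ m), if_pos (by omega : k ≤ m)]
          have := h3 k (by simp [hkO])
          rw [pvCge_cons, if_pos (by omega : k ≤ o)] at this
          omega
        case h4 =>
          intro k
          rw [pvCnt_seg_succ_ne full k m hmlt .C .O htm (by decide),
              pvCnt_seg_succ_self full k m hmlt .C htm]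
          by_cases hk : k ≤ m
          · rw [if_pos hk, if_pos hk]
            have := h4 k
            rw [pvCge_cons] at this
            split at this <;> omega
          · rw [if_neg hk, if_neg hk]
            have := pvCge_nonneg os k
            omega
        exact and_congr_left' (pvFirst_congr _ _ .C rest (by positivity) (by simp only [pvW, List.length_cons]; push_cast; omega)).symm
      | nil =>
        cases U with
        | cons u us =>
          rw [pvRun]
          rw [ih (m+1) [] us hdrop' (by omega) h1 (by simp)
            (List.pairwise_cons.mp h2).2
            (fun x hx => ⟨by have := (h2b x (by simp [hx])).1; omega, (h2b x (by simp [hx])).2⟩)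
            (by simp) ?h4]
          case h4 =>
            intro k
            rw [pvCnt_seg_succ_ne full k m hmlt .C .O htm (by decide),
                pvCnt_seg_succ_self full k m hmlt .C htm]
            by_cases hk : k ≤ m
            · rw [if_pos hk, if_pos hk]
              have := h4 k
              have h0 : pvCge ([] : List Nat) k = 0 := by simp [pvCge]
              rw [h0] at this ⊢
              omega
            · rw [if_neg hk, if_neg hk]
              simp [pvCge]
          exact and_congr_left' (pvFirst_congr _ _ .C rest (by positivity) (by simp only [pvW, List.length_cons]; push_cast; omega)).symm
        | nil =>
          rw [pvRun]
          apply iff_of_false (by simp)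
          rintro ⟨hfst, _⟩
          have := hfst 1
          simp [pvBal, pvW] at this


-- ---- bridges between the string ports and the abstract token machines ----

lemma pvToks_length (s locked : String) (hlen : s.toList.length ≤ locked.toList.length) :
    (pvToks s locked).length = s.toList.length := by
  simp only [pvToks, List.length_zipWith]
  omega

lemma pvToks_drop_cons (s locked : String) (hlen : s.toList.length ≤ locked.toList.length)
    (i : Nat) (hi : i < s.toList.length) :
    (pvToks s locked).drop i =
      pvTok (locked.toList[i]'(by omega)) (s.toList[i]'hi) :: (pvToks s locked).drop (i+1) := by
  rw [List.drop_eq_getElem_cons (by rw [pvToks_length s locked hlen]; omega)]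
  congr 1
  simp only [pvToks]
  exact List.getElem_zipWith

lemma pvGet_locked (s locked : String) (hlen : s.toList.length ≤ locked.toList.length)
    (i : Nat) (hi : i < s.toList.length) :
    PySem.Str.pyGet? locked (i : Int) = some (locked.toList[i]'(by omega)) := by
  simp [List.getElem?_eq_getElem (by omega : i < locked.toList.length)]

lemma pvGet_s (s locked : String) (i : Nat) (hi : i < s.toList.length) :
    PySem.Str.pyGet? s (i : Int) = some (s.toList[i]'hi) := by
  simp [List.getElem?_eq_getElem hi]

lemma pvFinishA_cast : ∀ (O U : List Nat),
    pvFinishA (O.map (fun x => (x : Int))) (U.map (fun x => (x : Int))) = pvFinish O U := by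
  intro O
  induction O with
  | nil => intro U; cases U <;> rfl
  | cons o os ih =>
    intro U
    cases U with
    | nil => rfl
    | cons u us =>
      show (if (o : Int) < (u : Int) then
              pvFinishA (List.map (fun x => (x : Int)) os) (List.map (fun x => (x : Int)) us)
            else false) =
           (if o < u then pvFinish os us else false)
      by_cases h : o < u
      · rw [if_pos (by exact_mod_cast h), if_pos h]
        exact ih us
      · rw [if_neg (by exact_mod_cast h), if_neg h]

lemma pvLoopA_step (s locked : String) (i : Nat) (opens unlocked : List Int) (lk c : Char)
    (h : i < s.toList.length)
    (hg1 : PySem.Str.pyGet? locked (i : Int) = some lk)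
    (hg2 : PySem.Str.pyGet? s (i : Int) = some c) :
    pvLoopA s locked i opens unlocked =
      (if lk = '0' then pvLoopA s locked (i+1) opens ((i : Int) :: unlocked)
       else if c = '(' then pvLoopA s locked (i+1) ((i : Int) :: opens) unlocked
       else if c = ')' then
         match opens, unlocked with
         | _ :: os, _ => pvLoopA s locked (i+1) os unlocked
         | [], _ :: us => pvLoopA s locked (i+1) [] us
         | [], [] => false
       else pvLoopA s locked (i+1) opens unlocked) := by
  rw [pvLoopA.eq_def, dif_pos h, hg1, hg2]

lemma pvLoopA_run (s locked : String) (hlen : s.toList.length ≤ locked.toList.length) :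
    ∀ (d i : Nat) (O U : List Nat), s.toList.length ≤ i + d →
    pvLoopA s locked i (O.map (fun x => (x : Int))) (U.map (fun x => (x : Int))) =
      pvRun ((pvToks s locked).drop i) i O U := by
  intro d
  induction d with
  | zero =>
    intro i O U hd
    rw [pvLoopA.eq_def, dif_neg (by omega)]
    rw [List.drop_eq_nil_of_le (by rw [pvToks_length s locked hlen]; omega)]
    rw [pvRun]
    exact pvFinishA_cast O U
  | succ d ih =>
    intro i O U hd
    by_cases hi : i < s.toList.length
    · rw [pvLoopA_step s locked i _ _ _ _ hi (pvGet_locked s locked hlen i hi) (pvGet_s s locked i hi)]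
      rw [pvToks_drop_cons s locked hlen i hi]
      set lk := locked.toList[i]'(by omega) with hlk
      set c := s.toList[i]'hi with hc
      by_cases h0 : lk = '0'
      · rw [if_pos h0]
        have ht : pvTok lk c = .U := by simp [pvTok, h0]
        rw [ht, pvRun]
        rw [show ((i : Int) :: U.map (fun x => (x : Int))) = ((i :: U).map (fun x => (x : Int))) by simp]
        exact ih (i+1) O (i :: U) (by omega)
      · rw [if_neg h0]
        by_cases hop : c = '('
        · rw [if_pos hop]
          have ht : pvTok lk c = .O := by simp [pvTok, h0, hop]
          rw [ht, pvRun]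
          rw [show ((i : Int) :: O.map (fun x => (x : Int))) = ((i :: O).map (fun x => (x : Int))) by simp]
          exact ih (i+1) (i :: O) U (by omega)
        · rw [if_neg hop]
          by_cases hcl : c = ')'
          · rw [if_pos hcl]
            have ht : pvTok lk c = .C := by simp [pvTok, h0, hop, hcl]
            rw [ht]
            cases O with
            | cons o os =>
              rw [pvRun]
              exact ih (i+1) os U (by omega)
            | nil =>
              cases U with
              | cons u us =>
                rw [pvRun]
                exact ih (i+1) [] us (by omega)
              | nil => rfl
          · rw [if_neg hcl]
            have ht : pvTok lk c = .N := by simp [pvTok, h0, hop, hcl]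
            rw [ht, pvRun]
            exact ih (i+1) O U (by omega)
    · rw [pvLoopA.eq_def, dif_neg hi]
      rw [List.drop_eq_nil_of_le (by rw [pvToks_length s locked hlen]; omega)]
      rw [pvRun]
      exact pvFinishA_cast O U

lemma pvLoopBf_step (s locked : String) (i : Nat) (bal : Int) (lk c : Char)
    (h : i < s.toList.length)
    (hg1 : PySem.Str.pyGet? locked (i : Int) = some lk)
    (hg2 : PySem.Str.pyGet? s (i : Int) = some c) :
    pvLoopBf s locked i bal =
      (if (if lk = '0' ∨ c = '(' then bal + 1 else if c = ')' then bal - 1 else bal) < 0 then false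
       else pvLoopBf s locked (i+1) (if lk = '0' ∨ c = '(' then bal + 1 else if c = ')' then bal - 1 else bal)) := by
  rw [pvLoopBf.eq_def, dif_pos h, hg1, hg2]

lemma pvLoopBf_bf (s locked : String) (hlen : s.toList.length ≤ locked.toList.length) :
    ∀ (d i : Nat) (b : Int), s.toList.length ≤ i + d →
    pvLoopBf s locked i b = pvBf ((pvToks s locked).drop i) b := by
  intro d
  induction d with
  | zero =>
    intro i b hd
    rw [pvLoopBf.eq_def, dif_neg (by omega)]
    rw [List.drop_eq_nil_of_le (by rw [pvToks_length s locked hlen]; omega)]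
    rfl
  | succ d ih =>
    intro i b hd
    by_cases hi : i < s.toList.length
    · rw [pvLoopBf_step s locked i _ _ _ hi (pvGet_locked s locked hlen i hi) (pvGet_s s locked i hi)]
      rw [pvToks_drop_cons s locked hlen i hi]
      set lk := locked.toList[i]'(by omega) with hlk
      set c := s.toList[i]'hi with hc
      rw [pvBf]
      have hb : (if lk = '0' ∨ c = '(' then b + 1 else if c = ')' then b - 1 else b) =
          b + pvW (pvTok lk c) := by
        by_cases h0 : lk = '0'
        · simp [pvTok, pvW, h0]
        · by_cases hop : c = '('
          · simp [pvTok, pvW, h0, hop]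
          · by_cases hcl : c = ')'
            · simp [pvTok, pvW, h0, hcl]; ring
            · simp [pvTok, pvW, h0, hop, hcl]
      rw [hb]
      by_cases hneg : b + pvW (pvTok lk c) < 0
      · rw [if_pos hneg, if_pos hneg]
      · rw [if_neg hneg, if_neg hneg]
        exact ih (i+1) _ (by omega)
    · rw [pvLoopBf.eq_def, dif_neg hi]
      rw [List.drop_eq_nil_of_le (by rw [pvToks_length s locked hlen]; omega)]
      rfl

lemma pvLoopBb_step (s locked : String) (i : Nat) (bal : Int) (lk c : Char)
    (hg1 : PySem.Str.pyGet? locked (i : Int) = some lk)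
    (hg2 : PySem.Str.pyGet? s (i : Int) = some c) :
    pvLoopBb s locked (i+1) bal =
      (if (if lk = '0' ∨ c = ')' then bal + 1 else if c = '(' then bal - 1 else bal) < 0 then false
       else pvLoopBb s locked i (if lk = '0' ∨ c = ')' then bal + 1 else if c = '(' then bal - 1 else bal)) := by
  rw [pvLoopBb, hg1, hg2]

lemma pvLoopBb_br (s locked : String) (hlen : s.toList.length ≤ locked.toList.length) :
    ∀ (i : Nat) (b : Int), i ≤ s.toList.length →
    pvLoopBb s locked i b = pvBr (((pvToks s locked).take i).reverse) b := by
  intro i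
  induction i with
  | zero => intro b _; rfl
  | succ i ih =>
    intro b hi
    have hilt : i < s.toList.length := by omega
    rw [pvLoopBb_step s locked i _ _ _ (pvGet_locked s locked hlen i hilt) (pvGet_s s locked i hilt)]
    set lk := locked.toList[i]'(by omega) with hlk
    set c := s.toList[i]'hilt with hc
    have htake : (pvToks s locked).take (i+1) = (pvToks s locked).take i ++ [pvTok lk c] := by
      rw [List.take_add_one, List.getElem?_eq_getElem (by rw [pvToks_length s locked hlen]; omega)]
      congr 1
      simp only [pvToks, Option.toList]
      congr 1
      exact List.getElem_zipWith
    rw [htake, List.reverse_append]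
    simp only [List.reverse_cons, List.reverse_nil, List.nil_append, List.singleton_append]
    rw [pvBr]
    have hb : (if lk = '0' ∨ c = ')' then b + 1 else if c = '(' then b - 1 else b) =
        b + pvWr (pvTok lk c) := by
      by_cases h0 : lk = '0'
      · simp [pvTok, pvWr, h0]
      · by_cases hop : c = '('
        · simp [pvTok, pvWr, h0, hop]; ring
        · by_cases hcl : c = ')'
          · simp [pvTok, pvWr, h0, hcl]
          · simp [pvTok, pvWr, h0, hop, hcl]
    rw [hb]
    by_cases hneg : b + pvWr (pvTok lk c) < 0
    · rw [if_pos hneg, if_pos hneg]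
    · rw [if_neg hneg, if_neg hneg]
      exact ih _ (by omega)

lemma pvRbal_rev_take (l : List PvTok) (k : Nat) :
    pvRbal (l.reverse.take k) = pvRbal (l.drop (l.length - k)) := by
  rw [List.take_reverse]
  simp [pvRbal]

lemma pvRev_iff (l : List PvTok) :
    (∀ k : Nat, 0 ≤ pvRbal (l.reverse.take k)) ↔ (∀ k : Nat, 0 ≤ pvRbal (l.drop k)) := by
  constructor
  · intro h j
    by_cases hj : j ≤ l.length
    · have := h (l.length - j)
      rw [pvRbal_rev_take] at this
      have he : l.length - (l.length - j) = j := by omega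
      rwa [he] at this
    · rw [List.drop_eq_nil_of_le (by omega)]
      simp [pvRbal]
  · intro h k
    rw [pvRbal_rev_take]
    exact h _

-- ===== VERDICT (by name: the statement is the Claim_ definition above) =====
theorem canBeValid_stack_spec : Claim_equal_canBeValid_stack := by
  intro s locked _ hpre
  unfold Spec_canBeValid_stack canBeValid_stack canBeValid_stack_alt
  have hmod : PySem.Int.mod (PySem.Str.len s) 2 = ((s.toList.length % 2 : Nat) : Int) := by
    rw [PySem.Str.len_eq]
    exact_mod_cast PySem.Int.mod_natCast s.toList.length 2
  have hL : s.toList.length = s.length := by simp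
  by_cases hodd : s.toList.length % 2 = 1
  · have h1 : ((s.length : Int) % 2 = 1) := by omega
    simp [hmod, h1]
  · have hlen : s.toList.length ≤ locked.toList.length := by
      rcases hpre with h | h
      · exact absurd h hodd
      · exact h
    have h0 : s.toList.length % 2 = 0 := by omega
    simp only [hmod, h0, Nat.cast_zero]
    norm_num
    have hA : pvLoopA s locked 0 [] [] = pvRun (pvToks s locked) 0 [] [] := by
      have := pvLoopA_run s locked hlen s.toList.length 0 [] [] (by omega)
      simpa using this
    have hBf : pvLoopBf s locked 0 0 = pvBf (pvToks s locked) 0 := by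
      simpa using pvLoopBf_bf s locked hlen s.toList.length 0 0 (by omega)
    have hBb : pvLoopBb s locked s.length 0 = pvBr ((pvToks s locked).reverse) 0 := by
      rw [← hL, pvLoopBb_br s locked hlen s.toList.length 0 (le_refl _)]
      rw [← pvToks_length s locked hlen, List.take_length]
    rw [hA, hBf, hBb]
    have hmain := pvMain (pvToks s locked) (pvToks s locked) 0 ([] : List Nat) ([] : List Nat)
      rfl (by omega) (by simp) (by simp) (by simp) (by simp) (by simp)
      (by intro k; rw [pvSeg_zero]; simp [pvCnt, pvCge])
    rw [Bool.eq_iff_iff, Bool.and_eq_true, hmain,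
        pvBf_spec (pvToks s locked) 0 le_rfl, pvBr_spec ((pvToks s locked).reverse) 0 le_rfl]
    constructor
    · rintro ⟨hf, hb2⟩
      refine ⟨fun k => by have := hf k; simp at this ⊢; omega, fun k => ?_⟩
      have := (pvRev_iff (pvToks s locked)).mpr (fun j => hb2 j) k
      omega
    · rintro ⟨hf, hb2⟩
      refine ⟨fun k => by have := hf k; simp; omega, ?_⟩
      apply (pvRev_iff (pvToks s locked)).mp
      intro k
      have := hb2 k
      omega
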